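-- pv_equiv track=rewrite | github.com/Samemantlt/python_lms | kr.4.5.py | grasshopper_inner
-- ===== SOURCE A (Python) =====
-- def grasshopper_inner(start, finish, length):
--     if start == finish:
--         if length == 0:
--             return [[finish]]
--         else:
--             return []
--
--     if length == 0:
--         return []
--
--     anothers = [
--         *grasshopper_inner(start + 1, finish, length - 1),
--         *grasshopper_inner(start + 2, finish, length - 1),
--         *grasshopper_inner(start - 1, finish, length - 1),
--         *grasshopper_inner(start - 2, finish, length - 1),
--     ]
--
--     result = []
--     for i in anothers:
--         if i is not None:
--             result.append([start] + list(i))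
--
--     return result
-- ===== SOURCE B (Python) =====
-- def grasshopper_inner(start, finish, length):
--     results = []
--     stack = [(start, length, [start])]
--     while stack:
--         pos, rem, path = stack.pop()
--         if pos == finish:
--             if rem == 0:
--                 results.append(path)
--             continue
--         if rem == 0:
--             continue
--         for step in (-2, -1, 2, 1):
--             stack.append((pos + step, rem - 1, path + [pos + step]))
--     return results
-- ===== Notes on version B (the rewrite author's own statement) =====
-- stated objective: alternative
-- what changed: Replaced A's recursive enumeration (four recursive calls merged then a prefixing loop copying every sub-path at every level) by an iterative DFS over an explicit stack of (pos, remaining, path) frames, pushing successors in reverse so the output order matches A's preorder.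
import Mathlib
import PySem

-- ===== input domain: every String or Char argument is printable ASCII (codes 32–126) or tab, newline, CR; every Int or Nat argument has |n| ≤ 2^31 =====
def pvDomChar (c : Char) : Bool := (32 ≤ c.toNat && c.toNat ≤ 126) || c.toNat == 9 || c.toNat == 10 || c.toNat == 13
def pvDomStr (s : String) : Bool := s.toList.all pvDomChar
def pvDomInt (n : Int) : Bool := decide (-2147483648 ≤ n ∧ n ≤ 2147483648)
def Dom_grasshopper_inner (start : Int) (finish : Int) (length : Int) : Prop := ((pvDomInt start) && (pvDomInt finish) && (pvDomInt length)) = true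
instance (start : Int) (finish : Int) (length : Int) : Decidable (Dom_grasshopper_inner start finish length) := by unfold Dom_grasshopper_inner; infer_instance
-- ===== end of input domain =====

-- B replaces A's recursive enumeration (four recursive calls then a prefixing loop) by an
-- iterative DFS over an explicit stack of (pos, remaining, path) frames; same return value
-- (alternative decomposition, no speed claim).

-- ===== PORT A =====
-- A's recursion decreases `length` by 1 each call; the Nat fuel (= length.toNat at the top level)
-- only bounds that depth and its 0-case is unreachable whenever length ≥ 0 (Pre_): a totality guard.
def goA (finish : Int) (fuel : Nat) (start : Int) (length : Int) : List (List Int) :=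
  if start = finish then
    if length = 0 then [[finish]] else []
  else if length = 0 then []
  else
    match fuel with
    | 0 => []  -- unreachable inside Pre_ (fuel = length > 0 here)
    | m + 1 =>
      let anothers :=
        goA finish m (start + 1) (length - 1) ++
        goA finish m (start + 2) (length - 1) ++
        goA finish m (start - 1) (length - 1) ++
        goA finish m (start - 2) (length - 1)
      -- the `i is not None` test is vacuously true: anothers holds lists only
      anothers.foldl (fun result i => result ++ [start :: i]) []

def grasshopper_inner (start : Int) (finish : Int) (length : Int) : List (List Int) :=
  goA finish length.toNat start length

-- ===== PORT B =====
-- stack weight used for termination of the while loop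
def pvWeight (stack : List (Int × Int × List Int)) : Nat :=
  (stack.map (fun f => 5 ^ f.2.1.toNat)).sum

-- head of the list = top of the Python stack; Python pushes steps -2,-1,2,1, so +1 is popped first.
-- Python tests `rem == 0`; the port skips on `rem ≤ 0` — a totality guard, identical whenever the
-- initial length is ≥ 0 (then every rem stays ≥ 0).
def goB (finish : Int) (stack : List (Int × Int × List Int)) (results : List (List Int)) :
    List (List Int) :=
  match stack with
  | [] => results
  | (pos, rem, path) :: rest =>
    if pos = finish then
      if rem = 0 then goB finish rest (results ++ [path])
      else goB finish rest results
    else if rem ≤ 0 then goB finish rest results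
    else
      goB finish
        ((pos + 1, rem - 1, path ++ [pos + 1]) ::
         (pos + 2, rem - 1, path ++ [pos + 2]) ::
         (pos - 1, rem - 1, path ++ [pos - 1]) ::
         (pos - 2, rem - 1, path ++ [pos - 2]) :: rest) results
  termination_by pvWeight stack
  decreasing_by
  all_goals
    simp only [pvWeight, List.map_cons, List.sum_cons]
    have h2 : 1 ≤ 5 ^ (rem - 1).toNat := Nat.one_le_pow _ _ (by norm_num)
    have h3 : 1 ≤ 5 ^ rem.toNat := Nat.one_le_pow _ _ (by norm_num)
    try omega
    all_goals
      have h1 : rem.toNat = (rem - 1).toNat + 1 := by omega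
      rw [h1, pow_succ]; omega

def grasshopper_inner_alt (start : Int) (finish : Int) (length : Int) : List (List Int) :=
  goB finish [(start, length, [start])] []

-- ===== PRECONDITION & SPEC =====
-- Pre_ excludes start ≠ finish with length < 0, where Python A raises RecursionError
-- (and Python B loops forever).
def Pre_grasshopper_inner (start : Int) (finish : Int) (length : Int) : Prop :=
  0 ≤ length ∨ start = finish
instance (start : Int) (finish : Int) (length : Int) :
    Decidable (Pre_grasshopper_inner start finish length) := by
  unfold Pre_grasshopper_inner; infer_instance

def pvWitness_grasshopper_inner : Int × Int × Int := (0, 2, 4)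

def Spec_grasshopper_inner (start : Int) (finish : Int) (length : Int) (out : List (List Int)) : Prop := out = grasshopper_inner_alt start finish length
instance (start : Int) (finish : Int) (length : Int) (out : List (List Int)) : Decidable (Spec_grasshopper_inner start finish length out) := by unfold Spec_grasshopper_inner; infer_instance

-- ===== CLAIM (what is proved, stated in full; the proofs are below) =====
def Claim_equal_grasshopper_inner : Prop := ∀ (start : Int) (finish : Int) (length : Int), Dom_grasshopper_inner start finish length → Pre_grasshopper_inner start finish length → Spec_grasshopper_inner start finish length (grasshopper_inner start finish length)

-- ===== LEMMAS AND PROOFS =====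

-- A's result-building loop is a map
lemma foldl_prefix (c : Int) (l : List (List Int)) (acc : List (List Int)) :
    l.foldl (fun result i => result ++ [c :: i]) acc = acc ++ l.map (c :: ·) := by
  induction l generalizing acc with
  | nil => simp
  | cons x xs ih => simp [List.foldl_cons, ih]

-- contribution of one stack frame to the final answer
def contrib (finish : Int) (f : Int × Int × List Int) : List (List Int) :=
  (goA finish f.2.1.toNat f.1 f.2.1).map (fun p => f.2.2.dropLast ++ p)

lemma goB_eq (finish : Int) (stack : List (Int × Int × List Int)) (results : List (List Int))
    (hinv : ∀ f ∈ stack, ∃ pre, f.2.2 = pre ++ [f.1]) :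
    goB finish stack results = results ++ stack.flatMap (contrib finish) := by
  induction stack, results using goB.induct finish with
  | case1 results => rw [goB]; simp
  | case2 results path rest ih =>
    obtain ⟨pre, hp⟩ := hinv _ (List.mem_cons_self ..)
    have hp0 : path = pre ++ [finish] := hp
    have hrest := ih (fun f hf => hinv f (List.mem_cons_of_mem _ hf))
    rw [goB]
    simp only [hrest, List.flatMap_cons]
    simp [contrib, goA, hp0]
  | case3 results rem path rest hrem ih =>
    have hrest := ih (fun f hf => hinv f (List.mem_cons_of_mem _ hf))
    rw [goB]
    simp only [if_neg hrem, hrest, List.flatMap_cons]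
    have : goA finish rem.toNat finish rem = [] := by rw [goA.eq_def]; simp [hrem]
    simp [contrib, this]
  | case4 results pos rem path rest hpos hle ih =>
    have hrest := ih (fun f hf => hinv f (List.mem_cons_of_mem _ hf))
    have hz : rem.toNat = 0 := by omega
    rw [goB]
    simp only [if_neg hpos, if_pos hle, hrest, List.flatMap_cons]
    rcases eq_or_ne rem 0 with h0 | h0
    · simp [contrib, goA, hpos, h0]
    · simp [contrib, goA, hpos, h0, hz]
  | case5 results pos rem path rest hpos hle ih =>
    obtain ⟨pre, hp⟩ := hinv _ (List.mem_cons_self ..)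
    have hp0 : path = pre ++ [pos] := hp
    have hp' : path.dropLast ++ [pos] = path := by rw [hp0, List.dropLast_concat]
    have hinv' : ∀ f ∈ ((pos + 1, rem - 1, path ++ [pos + 1]) ::
         (pos + 2, rem - 1, path ++ [pos + 2]) ::
         (pos - 1, rem - 1, path ++ [pos - 1]) ::
         (pos - 2, rem - 1, path ++ [pos - 2]) :: rest),
         ∃ pre, f.2.2 = pre ++ [f.1] := by
      intro f hf
      simp only [List.mem_cons] at hf
      rcases hf with h | h | h | h | h
      · exact ⟨path, by rw [h]⟩
      · exact ⟨path, by rw [h]⟩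
      · exact ⟨path, by rw [h]⟩
      · exact ⟨path, by rw [h]⟩
      · exact hinv f (List.mem_cons_of_mem _ h)
    have hrest := ih hinv'
    have hm : rem.toNat = (rem - 1).toNat + 1 := by omega
    have hrem0 : rem ≠ 0 := by omega
    rw [goB]
    simp only [if_neg hpos, if_neg hle, hrest, List.flatMap_cons]
    have hparent : contrib finish (pos, rem, path) =
        contrib finish (pos + 1, rem - 1, path ++ [pos + 1]) ++
        contrib finish (pos + 2, rem - 1, path ++ [pos + 2]) ++
        contrib finish (pos - 1, rem - 1, path ++ [pos - 1]) ++
        contrib finish (pos - 2, rem - 1, path ++ [pos - 2]) := by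
      simp only [contrib, hm]
      conv_lhs => rw [goA]
      rw [if_neg hpos, if_neg hrem0, foldl_prefix]
      simp only [List.nil_append, List.map_map, List.map_append, List.dropLast_concat,
        Function.comp_def]
      have harr : ∀ q : List Int, path.dropLast ++ pos :: q = path ++ q := by
        intro q
        rw [← hp', List.append_assoc]
        simp
      simp only [harr]
    rw [hparent]
    simp [List.append_assoc]

theorem main_eq (start finish length : Int) :
    grasshopper_inner start finish length = grasshopper_inner_alt start finish length := by
  have h := goB_eq finish [(start, length, [start])] []
    (by intro f hf; simp at hf; subst hf; exact ⟨[], rfl⟩)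
  simp [grasshopper_inner_alt, grasshopper_inner, h, contrib]

-- ===== VERDICT (by name: the statement is the Claim_ definition above) =====
theorem grasshopper_inner_spec : Claim_equal_grasshopper_inner := by
  intro s f l _ _
  exact main_eq s f l
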